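-- pv_equiv track=rewrite | github.com/roja-a-m/folder-organization | Median Analysis/solution.py | getMaxSubsequenceLen
-- ===== SOURCE A (Python) =====
-- import heapq
--
-- def getMaxSubsequenceLen (arr):
--     n, freq, K = len(arr), {}, {}
--     for i in arr:
--         freq[i] = 1 if i not in freq else freq[i] + 1
--     sorted_arr = sorted(set(arr))
--     for idx, x in enumerate(sorted_arr):
--         num_smaller_than_x = idx
--         num_greater_than_x = len(sorted_arr) - idx - 1
--         K[x] = min(num_smaller_than_x, num_greater_than_x)
--     sum_of_elements_smaller_than_x, min_heap, total_sum = {}, [], 0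
--     for x in sorted_arr:
--         # Case when number of elements less than x is more than the number of elements greater than x
--         if len(min_heap) <= K[x]:
--             sum_of_elements_smaller_than_x[x] = total_sum
--         # Case when number of elements less than x is less than the number of elements greater than x
--         else:
--             while len(min_heap) != K[x]:
--                 total_sum -= abs(heapq.heappop(min_heap))
--             sum_of_elements_smaller_than_x[x] = total_sum
--         heapq.heappush(min_heap, freq[x])
--         total_sum += freq[x]
--     # Pre computing the sum of K largest frequencies of numbers smaller than x
--     sum_of_elements_greater_than_x, min_heap, total_sum = {}, [], 0
--     for x in reversed(sorted_arr):
--         # Case when number of elements less than x is more than the number of elements greater than x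
--         if len(min_heap) <= K[x]:
--             sum_of_elements_greater_than_x[x] = total_sum
--         # Case when number of elements less than x is less than the number of elements greater than x
--         else:
--             while len(min_heap) != K[x]:
--                 total_sum -= abs(heapq.heappop(min_heap))
--             sum_of_elements_greater_than_x[x] = total_sum
--         heapq.heappush(min_heap, freq[x])
--         total_sum += freq[x]
--     ans = {}
--     for x in set(arr):
--         lower, greater, equal = sum_of_elements_smaller_than_x[x], sum_of_elements_greater_than_x[x], freq[x]
--         # Number of elements greater than x in optimal subsequence
--         ans[x] = 2 * min(lower, greater) + equal + min(abs(lower - greater), equal)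
--     return [ans[i] if ans[i] % 2 else ans[i] - 1 for i in arr]
-- ===== SOURCE B (Python) =====
-- def getMaxSubsequenceLen(arr):
--     freq = {}
--     for v in arr:
--         freq[v] = freq.get(v, 0) + 1
--     vals = sorted(freq)
--     f = [freq[v] for v in vals]
--     D = len(vals)
--     ans = {}
--     for idx, x in enumerate(vals):
--         K = min(idx, D - 1 - idx)
--         lower = sum(sorted(f[:idx], reverse=True)[:K])
--         greater = sum(sorted(f[idx + 1:], reverse=True)[:K])
--         equal = f[idx]
--         r = 2 * min(lower, greater) + equal + min(abs(lower - greater), equal)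
--         ans[x] = r if r % 2 else r - 1
--     return [ans[v] for v in arr]
-- ===== Notes on version B (the rewrite author's own statement) =====
-- stated objective: simpler
-- what changed: B drops A's two amortized min-heap sweeps (with the precomputed K dict and in-heap pop accounting) and instead, for each sorted distinct value, directly sums the K largest frequencies of the values below and above it via sorted sublists, folding the odd-adjustment into the answer dict.
import Mathlib
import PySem

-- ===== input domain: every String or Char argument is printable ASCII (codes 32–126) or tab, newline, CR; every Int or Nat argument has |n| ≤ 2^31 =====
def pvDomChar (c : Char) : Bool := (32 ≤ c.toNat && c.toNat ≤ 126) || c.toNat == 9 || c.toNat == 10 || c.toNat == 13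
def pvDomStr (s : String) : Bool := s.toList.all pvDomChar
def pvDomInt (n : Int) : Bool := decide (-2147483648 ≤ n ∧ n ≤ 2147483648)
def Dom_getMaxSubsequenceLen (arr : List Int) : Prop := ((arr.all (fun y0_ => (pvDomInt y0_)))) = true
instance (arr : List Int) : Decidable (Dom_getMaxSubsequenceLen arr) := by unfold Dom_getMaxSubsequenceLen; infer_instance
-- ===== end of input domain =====

-- B replaces A's streaming min-heap scan over precomputed K[x] by a direct per-index
-- top-K selection (sort each frequency sublist, take the K largest); objective: simpler.


-- ===== PORT A =====
-- heapq min-heap modeled as an ascending sorted list: heappush = orderedInsert,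
-- heappop = remove the head (the minimum) — exact for the sequence of popped values
def pvHeapPush (h : List Int) (v : Int) : List Int := List.orderedInsert (· ≤ ·) v h
-- 'while len(min_heap) != K[x]: total_sum -= abs(heapq.heappop(min_heap))'
-- (A reaches it only with len(min_heap) > K[x]; the [] case is Python's IndexError, unreachable)
def pvPopLoop (k : Int) : List Int → Int → List Int × Int
  | [], t => ([], t)
  | a :: h, t => if PySem.List.len (a :: h) = k then (a :: h, t) else pvPopLoop k h (t - |a|)

-- loop body shared by A's two textually identical prefix/suffix loops;
-- state = (sum dict, min_heap, total_sum); dict lookups K[x]/freq[x] always hit (keys present)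
def pvSumStep (freq Kd : PySem.Dict Int Int) (st : PySem.Dict Int Int × List Int × Int) (x : Int) :
    PySem.Dict Int Int × List Int × Int :=
  let k := Kd.getD x 0
  let ht := if PySem.List.len st.2.1 ≤ k then (st.2.1, st.2.2) else pvPopLoop k st.2.1 st.2.2
  (st.1.insert x ht.2, pvHeapPush ht.1 (freq.getD x 0), ht.2 + freq.getD x 0)

def getMaxSubsequenceLen (arr : List Int) : List Int :=
  -- n = len(arr) is never used by A
  let freq : PySem.Dict Int Int := arr.foldl (fun d i =>
    if d.contains i = false then d.insert i 1 else d.insert i (d.getD i 0 + 1)) PySem.Dict.empty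
  let sortedArr := PySem.List.sorted (PySem.Set.ofList arr) (fun x => x) false
  -- enumerate(sorted_arr): pairs (idx, x)
  let Kd : PySem.Dict Int Int := (PySem.List.enumerate sortedArr).foldl (fun d p =>
    d.insert p.2 (min p.1 (PySem.List.len sortedArr - p.1 - 1))) PySem.Dict.empty
  let smaller := (sortedArr.foldl (pvSumStep freq Kd) (PySem.Dict.empty, [], 0)).1
  let greater := (sortedArr.reverse.foldl (pvSumStep freq Kd) (PySem.Dict.empty, [], 0)).1
  let ans : PySem.Dict Int Int := (PySem.Set.ofList arr).foldl (fun d x =>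
    let lower := smaller.getD x 0
    let greaterv := greater.getD x 0
    let equal := freq.getD x 0
    d.insert x (2 * min lower greaterv + equal + min |lower - greaterv| equal)) PySem.Dict.empty
  arr.map (fun i => if PySem.Int.mod (ans.getD i 0) 2 ≠ 0 then ans.getD i 0 else ans.getD i 0 - 1)

-- ===== PORT B =====
def getMaxSubsequenceLen_alt (arr : List Int) : List Int :=
  let freq : PySem.Dict Int Int := arr.foldl (fun d v => d.insert v (d.getD v 0 + 1)) PySem.Dict.empty
  let vals := PySem.List.sorted freq.keys (fun x => x) false
  let f := vals.map (fun v => freq.getD v 0)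
  let D := PySem.List.len vals
  let ans : PySem.Dict Int Int := (PySem.List.enumerate vals).foldl (fun d p =>
    let idx : Int := p.1
    let K := min idx (D - 1 - idx)
    let lower := (PySem.List.slice (PySem.List.sorted (PySem.List.slice f none (some idx)) (fun y => y) true) none (some K)).sum
    let greater := (PySem.List.slice (PySem.List.sorted (PySem.List.slice f (some (idx + 1)) none) (fun y => y) true) none (some K)).sum
    let equal := PySem.List.pyGetD f idx 0
    let r := 2 * min lower greater + equal + min |lower - greater| equal
    d.insert p.2 (if PySem.Int.mod r 2 ≠ 0 then r else r - 1)) PySem.Dict.empty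
  arr.map (fun v => ans.getD v 0)

-- ===== PRECONDITION & SPEC =====
def Spec_getMaxSubsequenceLen (arr : List Int) (out : List Int) : Prop := out = getMaxSubsequenceLen_alt arr
instance (arr : List Int) (out : List Int) : Decidable (Spec_getMaxSubsequenceLen arr out) := by unfold Spec_getMaxSubsequenceLen; infer_instance

-- ===== CLAIM (what is proved, stated in full; the proofs are below) =====
def Claim_equal_getMaxSubsequenceLen : Prop := ∀ (arr : List Int), Dom_getMaxSubsequenceLen arr → Spec_getMaxSubsequenceLen arr (getMaxSubsequenceLen arr)

-- ===== LEMMAS AND PROOFS =====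
def topsum (j : Nat) (l : List Int) : Int := ((PySem.List.sorted l (fun y : Int => y) true).take j).sum

theorem sortedDesc_eq_of_perm {l₁ l₂ : List Int} (h : l₁.Perm l₂) :
    PySem.List.sorted l₁ (fun y : Int => y) true = PySem.List.sorted l₂ (fun y : Int => y) true := by
  apply List.Perm.eq_of_pairwise (le := fun a b : Int => b ≤ a)
  · exact fun a b _ _ h1 h2 => le_antisymm h2 h1
  · exact PySem.List.sorted_pairwise_rev l₁ _
  · exact PySem.List.sorted_pairwise_rev l₂ _
  · exact ((PySem.List.sorted_perm l₁ _ _).trans h).trans (PySem.List.sorted_perm l₂ _ _).symm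

theorem topsum_perm {l₁ l₂ : List Int} (h : l₁.Perm l₂) (j : Nat) : topsum j l₁ = topsum j l₂ := by
  unfold topsum; rw [sortedDesc_eq_of_perm h]

theorem sortedDesc_of_sorted {l : List Int} (h : l.Pairwise (· ≤ ·)) :
    PySem.List.sorted l (fun y : Int => y) true = l.reverse := by
  apply List.Perm.eq_of_pairwise (le := fun a b : Int => b ≤ a)
  · exact fun a b _ _ h1 h2 => le_antisymm h2 h1
  · exact PySem.List.sorted_pairwise_rev l _
  · exact (List.pairwise_reverse).mpr (h.imp (fun hab => hab))
  · exact (PySem.List.sorted_perm l _ _).trans (List.reverse_perm l).symm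

theorem topsum_of_sorted {l : List Int} (h : l.Pairwise (· ≤ ·)) {j : Nat} (_hj : j ≤ l.length) :
    topsum j l = (l.drop (l.length - j)).sum := by
  unfold topsum
  rw [sortedDesc_of_sorted h, List.take_reverse, List.sum_reverse]

theorem topsum_zero (l : List Int) : topsum 0 l = 0 := rfl

theorem topsum_drop {l : List Int} (h : l.Pairwise (· ≤ ·)) {d j : Nat} (hj : j + d ≤ l.length) :
    topsum j (l.drop d) = topsum j l := by
  rw [topsum_of_sorted h (by omega), topsum_of_sorted (h.drop) (by simp; omega), List.drop_drop]
  congr 1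
  simp
  omega


theorem take_sum_le {l : List Int} {a : Int} {j : Nat}
    (hall : ∀ y ∈ l, y ≤ a) (ha0 : 0 ≤ a) (hj : 1 ≤ j) :
    (l.take j).sum ≤ a + (l.take (j-1)).sum := by
  by_cases h : j - 1 < l.length
  · have hje : j = (j-1) + 1 := by omega
    rw [hje, List.sum_take_succ l (j-1) h]
    simp only [Nat.add_sub_cancel]
    have := hall _ (List.getElem_mem h)
    omega
  · rw [List.take_of_length_le (by omega), List.take_of_length_le (by omega)]
    omega

theorem take_sum_insertDesc {a : Int} (ha : 0 ≤ a) :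
    ∀ (d : List Int), d.Pairwise (fun x y : Int => y ≤ x) → (∀ y ∈ d, 0 ≤ y) →
    ∀ (j : Nat), 1 ≤ j → j ≤ d.length + 1 →
    ((List.orderedInsert (fun x y : Int => y ≤ x) a d).take j).sum
      = max ((d.take j).sum) (a + (d.take (j-1)).sum)
  | [], _, _, j, hj, hj2 => by
    have hj1 : j = 1 := by simp only [List.length_nil] at hj2; omega
    subst hj1
    simp [List.orderedInsert]
    omega
  | b :: d', hd, hpos, j, hj, hj2 => by
    rw [List.orderedInsert]
    by_cases hab : b ≤ a
    · simp only [if_pos hab]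
      obtain ⟨j', rfl⟩ : ∃ j', j = j' + 1 := ⟨j - 1, by omega⟩
      rw [List.take_succ_cons, List.sum_cons]
      have hle : ((b :: d').take (j'+1)).sum ≤ a + ((b :: d').take j').sum := by
        apply take_sum_le _ ha (by omega)
        intro y hy
        rcases List.mem_cons.mp hy with rfl | hy
        · exact hab
        · exact le_trans (List.rel_of_pairwise_cons hd hy) hab
      simp only [Nat.add_sub_cancel]
      omega
    · simp only [if_neg hab]
      rcases Nat.lt_or_ge 1 j with hj1 | hj1
      · obtain ⟨j', rfl⟩ : ∃ j', j = j' + 1 := ⟨j - 1, by omega⟩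
        rw [List.take_succ_cons, List.sum_cons,
            take_sum_insertDesc ha d' hd.of_cons (fun y hy => hpos y (by simp [hy]))
              j' (by omega) (by simp only [List.length_cons] at hj2; omega)]
        simp only [Nat.add_sub_cancel]
        obtain ⟨j'', rfl⟩ : ∃ j'', j' = j'' + 1 := ⟨j' - 1, by omega⟩
        simp only [List.take_succ_cons, List.sum_cons, Nat.add_sub_cancel]
        omega
      · have hj1' : j = 1 := by omega
        subst hj1'
        simp
        omega

theorem topsum_cons {a : Int} {l : List Int} (ha : 0 ≤ a) (hl : ∀ y ∈ l, 0 ≤ y)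
    {j : Nat} (hj : 1 ≤ j) (hj2 : j ≤ l.length + 1) :
    topsum j (a :: l) = max (topsum j l) (a + topsum (j-1) l) := by
  have hins : PySem.List.sorted (a :: l) (fun y : Int => y) true
      = List.orderedInsert (fun x y : Int => y ≤ x) a (PySem.List.sorted l (fun y : Int => y) true) := by
    apply List.Perm.eq_of_pairwise (le := fun a b : Int => b ≤ a)
    · exact fun a b _ _ h1 h2 => le_antisymm h2 h1
    · exact PySem.List.sorted_pairwise_rev _ _
    · exact List.Pairwise.orderedInsert a _ (PySem.List.sorted_pairwise_rev l _)
    · exact ((PySem.List.sorted_perm _ _ _).trans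
        ((PySem.List.sorted_perm l _ _).symm.cons a)).trans
        (List.perm_orderedInsert _ a _).symm
  unfold topsum
  rw [hins, take_sum_insertDesc ha _ (PySem.List.sorted_pairwise_rev l _)
    (fun y hy => hl y ((PySem.List.sorted_perm l _ _).mem_iff.mp hy)) j hj
    (by rw [PySem.List.length_sorted]; omega)]

theorem pvPopLoop_spec (k : Nat) : ∀ (h : List Int) (t : Int), (∀ y ∈ h, 0 ≤ y) → t = h.sum →
    k ≤ h.length →
    pvPopLoop (k : Int) h t = (h.drop (h.length - k), (h.drop (h.length - k)).sum)
  | [], t, hpos, ht, hk => by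
    simp only [List.length_nil, Nat.le_zero] at hk
    simp [pvPopLoop, ht, hk]
  | a :: h, t, hpos, ht, hk => by
    rw [pvPopLoop]
    by_cases hlen : h.length + 1 = k
    · rw [if_pos (by simp [PySem.List.len_eq]; exact_mod_cast hlen)]
      rw [show (a :: h).length - k = 0 by simp; omega]
      simp [ht]
    · rw [if_neg (by simp [PySem.List.len_eq]; exact_mod_cast hlen)]
      have hk' : k ≤ h.length := by simp at hk; omega
      have ha : |a| = a := abs_of_nonneg (hpos a (by simp))
      rw [ha, pvPopLoop_spec k h (t - a) (fun y hy => hpos y (by simp [hy]))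
        (by rw [ht, List.sum_cons]; ring) hk']
      have : (a :: h).length - k = (h.length - k) + 1 := by simp; omega
      rw [this, List.drop_succ_cons]

def kkOf (D i : Nat) : Nat := min i (D - 1 - i)

-- heap-scan invariant: after m of the D loop iterations, with P the frequencies pushed so far
def ScanInv (D m : Nat) (P h : List Int) (t : Int) : Prop :=
  h.Pairwise (· ≤ ·) ∧ (∀ y ∈ h, 1 ≤ y) ∧ t = h.sum ∧ h.length = min m (D + 1 - m) ∧
  (if 2*m ≤ D + 1 then h.Perm P else ∀ j ≤ min (D - 1 - m) ((D - 1) / 2), topsum j h = topsum j P)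

theorem step_inv {D m : Nat} {P h : List Int} {t fa : Int}
    (hm : m < D) (hP : P.length = m) (hfa : 1 ≤ fa) (hPpos : ∀ y ∈ P, 0 ≤ y)
    (hinv : ScanInv D m P h t) :
    ((if PySem.List.len h ≤ min (m:Int) ((D:Int) - m - 1) then (h, t)
      else pvPopLoop (min (m:Int) ((D:Int) - m - 1)) h t).2 = topsum (kkOf D m) P) ∧
    ScanInv D (m+1) (P ++ [fa])
      (pvHeapPush (if PySem.List.len h ≤ min (m:Int) ((D:Int) - m - 1) then (h, t)
        else pvPopLoop (min (m:Int) ((D:Int) - m - 1)) h t).1 fa)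
      ((if PySem.List.len h ≤ min (m:Int) ((D:Int) - m - 1) then (h, t)
        else pvPopLoop (min (m:Int) ((D:Int) - m - 1)) h t).2 + fa) := by
  obtain ⟨hsort, hpos, ht, hlen, hphase⟩ := hinv
  set kk := kkOf D m with hkk
  have hkcast : min (m:Int) ((D:Int) - m - 1) = (kk : Int) := by
    simp only [hkk, kkOf]; push_cast [Nat.cast_min]; omega
  have hkklen : kk ≤ h.length := by simp only [hkk, kkOf]; omega
  -- the branch is uniformly "drop to size kk"
  have hht : (if PySem.List.len h ≤ min (m:Int) ((D:Int) - m - 1) then (h, t)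
      else pvPopLoop (min (m:Int) ((D:Int) - m - 1)) h t)
      = (h.drop (h.length - kk), (h.drop (h.length - kk)).sum) := by
    rw [hkcast]
    by_cases hb : h.length ≤ kk
    · have : h.length = kk := le_antisymm hb hkklen
      rw [if_pos (by simp [PySem.List.len_eq]; exact_mod_cast hb), this]
      simp [ht]
    · rw [if_neg (by simp [PySem.List.len_eq]; omega),
        pvPopLoop_spec kk h t (fun y hy => le_trans (by norm_num) (hpos y hy)) ht hkklen]
  rw [hht]
  dsimp only
  set h' := h.drop (h.length - kk) with hh'
  have hlen' : h'.length = kk := by simp [hh']; omega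
  have hsort' : h'.Pairwise (· ≤ ·) := hsort.drop
  have hpos' : ∀ y ∈ h', 1 ≤ y := fun y hy => hpos y (List.mem_of_mem_drop hy)
  -- topsum of h' agrees with topsum of h up to kk
  have hts' : ∀ j ≤ kk, topsum j h' = topsum j h := fun j hj =>
    topsum_drop hsort (by omega)
  -- topsum of h agrees with topsum of P up to kk
  have htsP : ∀ j ≤ kk, topsum j h = topsum j P := by
    intro j hj
    by_cases hph : 2*m ≤ D + 1
    · rw [if_pos hph] at hphase
      exact topsum_perm hphase j
    · rw [if_neg hph] at hphase
      exact hphase j (by simp only [hkk, kkOf] at hj ⊢; omega)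
  -- recorded value
  have hrec : h'.sum = topsum kk P := by
    rw [show h'.sum = topsum kk h' from ?_, hts' kk le_rfl, htsP kk le_rfl]
    rw [topsum_of_sorted hsort' (le_of_eq hlen'.symm), hlen', Nat.sub_self, List.drop_zero]
  refine ⟨hrec, hsort'.orderedInsert fa h', ?_, ?_, ?_, ?_⟩
  · intro y hy
    rcases List.mem_cons.mp ((List.perm_orderedInsert _ fa h').mem_iff.mp hy) with rfl | hy
    · exact hfa
    · exact hpos' y hy
  · rw [pvHeapPush, (List.perm_orderedInsert _ fa h').sum_eq, List.sum_cons]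
    ring
  · rw [pvHeapPush, List.orderedInsert_length, hlen']
    simp only [hkk, kkOf]; omega
  · by_cases hph1 : 2*(m+1) ≤ D + 1
    · rw [if_pos hph1]
      -- pure phase 1: kk = m, no pop (h' = h), and h ~ P
      have hkkm : kk = m := by simp only [hkk, kkOf]; omega
      have hhh : h' = h := by rw [hh']; rw [show h.length - kk = 0 by omega, List.drop_zero]
      have hperm : h.Perm P := by
        rw [if_pos (by omega)] at hphase; exact hphase
      refine ((List.perm_orderedInsert _ fa h').trans ?_).trans
        (by simpa using (List.perm_append_comm (l₁ := [fa]) (l₂ := P)))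
      rw [hhh]; exact hperm.cons fa
    · rw [if_neg hph1]
      intro j hj
      -- here 2m ≥ D, so kk = D - 1 - m and j ≤ kk - 1 (or kk = 0 and j = 0)
      have h2m : D ≤ 2*m := by omega
      have hkkval : kk = D - 1 - m := by simp only [hkk, kkOf]; omega
      rcases Nat.eq_zero_or_pos j with rfl | hj1
      · rw [topsum_zero, topsum_zero]
      have hjkk : j ≤ kk - 1 ∧ 1 ≤ kk := by
        constructor
        · omega
        · omega
      have hpush : topsum j (pvHeapPush h' fa) = topsum j (fa :: h') :=
        topsum_perm (List.perm_orderedInsert _ fa h') j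
      have hPapp : topsum j (P ++ [fa]) = topsum j (fa :: P) :=
        topsum_perm (List.perm_append_comm (l₁ := P) (l₂ := [fa])) j
      rw [hpush, hPapp,
        topsum_cons (by omega) (fun y hy => by linarith [hpos' y hy]) hj1 (by omega),
        topsum_cons (by omega) (fun y hy => ?_) hj1 (by omega),
        hts' j (by omega), htsP j (by omega), hts' (j-1) (by omega), htsP (j-1) (by omega)]
      · exact hPpos y hy

theorem sums_preserved (freq Kd : PySem.Dict Int Int) :
    ∀ (rest : List Int) (st : PySem.Dict Int Int × List Int × Int) (x : Int), x ∉ rest →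
    ((rest.foldl (pvSumStep freq Kd) st).1).get? x = st.1.get? x
  | [], st, x, hx => rfl
  | y :: rest, st, x, hx => by
    rw [List.foldl_cons, sums_preserved freq Kd rest _ x (fun h => hx (by simp [h]))]
    exact PySem.Dict.get?_insert_of_ne _ _ (fun h => hx (by simp [h]))

theorem scan_rec (freq Kd : PySem.Dict Int Int) (L : List Int) (hnd : L.Nodup)
    (hfr : ∀ x ∈ L, 1 ≤ freq.getD x 0)
    (hkf : ∀ i (hi : i < L.length), Kd.getD L[i] 0 = min (i:Int) ((L.length:Int) - i - 1)) :
    ∀ (rest done : List Int) (sums : PySem.Dict Int Int) (h : List Int) (t : Int),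
    L = done ++ rest →
    ScanInv L.length done.length (done.map (fun y => freq.getD y 0)) h t →
    ∀ i, done.length ≤ i → ∀ h2 : i < L.length,
    ((rest.foldl (pvSumStep freq Kd) (sums, h, t)).1).getD L[i] 0
      = topsum (kkOf L.length i) ((L.take i).map (fun y => freq.getD y 0))
  | [], done, sums, h, t, hL, hinv, i, h1, h2 => by
    exfalso; rw [hL] at h2; simp at h2; omega
  | x :: rest', done, sums, h, t, hL, hinv, i, h1, h2 => by
    subst hL
    have hmD : done.length < (done ++ x :: rest').length := by simp
    have hxL : (done ++ x :: rest')[done.length] = x := by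
      rw [List.getElem_append_right (le_refl done.length)]
      simp
    have hxmem : x ∈ (done ++ x :: rest') := by simp
    have hstep := step_inv (D := (done ++ x :: rest').length) (m := done.length)
      (P := done.map (fun y => freq.getD y 0)) (h := h) (t := t) (fa := freq.getD x 0)
      hmD (by simp) (hfr x hxmem)
      (by intro y hy
          obtain ⟨z, hz, rfl⟩ := List.mem_map.mp hy
          exact le_trans (by norm_num) (hfr z (List.mem_append_left _ hz)))
      hinv
    rw [List.foldl_cons]
    have hstepeq : pvSumStep freq Kd (sums, h, t) x
        = (sums.insert x (topsum (kkOf (done ++ x :: rest').length done.length) (done.map (fun y => freq.getD y 0))),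
           pvHeapPush (if PySem.List.len h ≤ min ((done.length : Int)) (((done ++ x :: rest').length:Int) - done.length - 1) then (h, t)
             else pvPopLoop (min ((done.length : Int)) (((done ++ x :: rest').length:Int) - done.length - 1)) h t).1 (freq.getD x 0),
           (if PySem.List.len h ≤ min ((done.length : Int)) (((done ++ x :: rest').length:Int) - done.length - 1) then (h, t)
             else pvPopLoop (min ((done.length : Int)) (((done ++ x :: rest').length:Int) - done.length - 1)) h t).2 + freq.getD x 0) := by
      simp only [pvSumStep]
      rw [← hxL, hkf done.length hmD, hxL]
      rw [hstep.1]
    rw [hstepeq]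
    rcases Nat.eq_or_lt_of_le h1 with rfl | hlt
    · -- i = done.length : the value recorded now survives the rest of the fold
      have hnotin : x ∉ rest' := by
        have := (List.nodup_append.mp hnd).2.1
        simp at this
        exact this.1
      rw [PySem.Dict.getD_eq_get?_getD, sums_preserved freq Kd rest' _ _ (by rw [hxL]; exact hnotin)]
      rw [hxL]
      rw [PySem.Dict.get?_insert_self]
      have hdone : (done ++ x :: rest').take done.length = done := List.take_left
      simp [hdone]
    · -- i > done.length : induction with done ++ [x]
      exact scan_rec freq Kd _ hnd hfr hkf rest' (done ++ [x]) _ _ _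
        (by rw [List.append_assoc]; rfl)
        (by simpa using hstep.2) i (by simpa using hlt) h2

theorem scan_getD (freq Kd : PySem.Dict Int Int) (L : List Int) (hnd : L.Nodup)
    (hfr : ∀ x ∈ L, 1 ≤ freq.getD x 0)
    (hkf : ∀ i (hi : i < L.length), Kd.getD L[i] 0 = min (i:Int) ((L.length:Int) - i - 1))
    (i : Nat) (hi : i < L.length) :
    ((L.foldl (pvSumStep freq Kd) (PySem.Dict.empty, [], 0)).1).getD L[i] 0
      = topsum (kkOf L.length i) ((L.take i).map (fun y => freq.getD y 0)) := by
  have h0 : ScanInv L.length 0 [] [] 0 :=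
    ⟨by simp, by simp, rfl, by simp, by rw [if_pos (by omega)]⟩
  exact scan_rec freq Kd L hnd hfr hkf L [] PySem.Dict.empty [] 0 rfl h0 i (Nat.zero_le i) hi

theorem mem_enumerate_self {l : List Int} {i : Nat} (hi : i < l.length) :
    ((i : Int), l[i]) ∈ PySem.List.enumerate l 0 :=
  (PySem.List.mem_enumerate_iff l 0 _).mpr ⟨i, hi, by simp⟩

-- dict built by inserting a value at each key of a Nodup list
theorem getD_foldl_insert_fn (ks : List Int) (f : Int → Int) (hnd : ks.Nodup)
    {x : Int} (hx : x ∈ ks) :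
    ((ks.foldl (fun d k => d.insert k (f k)) PySem.Dict.empty)).getD x 0 = f x := by
  have hitems := PySem.Dict.items_foldl_insert_fresh ks (fun a => a) f PySem.Dict.empty
    (by simp) (by simpa)
  apply PySem.Dict.getD_of_mem_items
  · rw [hitems]
    refine List.mem_append_right _ ?_
    exact List.mem_map.mpr ⟨x, hx, rfl⟩
  · show (List.map Prod.fst _).Nodup
    rw [hitems]
    simpa [List.map_map, Function.comp_def] using hnd

-- dict built over enumerate(ks): key p.2, value v p
theorem getD_foldl_insert_enum (S : List Int) (v : Int × Int → Int) (hnd : S.Nodup)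
    (i : Nat) (hi : i < S.length) :
    (((PySem.List.enumerate S 0).foldl (fun d p => d.insert p.2 (v p)) PySem.Dict.empty)).getD S[i] 0
      = v ((i : Int), S[i]) := by
  have hmapsnd : List.map Prod.snd (PySem.List.enumerate S 0) = S := by
    exact PySem.List.map_snd_enumerate S 0
  have hitems := PySem.Dict.items_foldl_insert_fresh (PySem.List.enumerate S 0) Prod.snd v
    PySem.Dict.empty (by simp) (by rw [hmapsnd]; exact hnd)
  apply PySem.Dict.getD_of_mem_items
  · rw [hitems]
    refine List.mem_append_right _ ?_
    exact List.mem_map.mpr ⟨((i : Int), S[i]), mem_enumerate_self hi, rfl⟩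
  · show (List.map Prod.fst _).Nodup
    rw [hitems]
    simpa [List.map_map, Function.comp_def, hmapsnd] using hnd

theorem counter_step (arr : List Int) :
    arr.foldl (fun d i => if d.contains i = false then d.insert i 1
      else d.insert i (d.getD i 0 + 1)) PySem.Dict.empty = PySem.Dict.counter arr := by
  rw [PySem.List.foldl_congr_mem (g := fun d (v : Int) => d.insert v (d.getD v 0 + 1))]
  · exact PySem.Dict.foldl_insert_getD_add_one_eq_counter arr
  · intro d x hx
    by_cases hc : d.contains x
    · rw [if_neg (by simp [hc])]
    · have hcf : d.contains x = false := by simpa using hc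
      rw [if_pos hcf, PySem.Dict.getD_of_not_contains _ _ hcf]
      norm_num

theorem getD_foldl_insert_fn' (ks : List Int) (step : PySem.Dict Int Int → Int → PySem.Dict Int Int)
    (f : Int → Int) (hstep : ∀ d k, step d k = d.insert k (f k)) (hnd : ks.Nodup)
    {x : Int} (hx : x ∈ ks) :
    ((ks.foldl step PySem.Dict.empty)).getD x 0 = f x := by
  rw [show ks.foldl step PySem.Dict.empty
      = ks.foldl (fun d k => d.insert k (f k)) PySem.Dict.empty from
    PySem.List.foldl_congr_mem _ _ _ _ (fun acc k _ => hstep acc k)]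
  exact getD_foldl_insert_fn ks f hnd hx

theorem getD_foldl_insert_enum' (S : List Int)
    (step : PySem.Dict Int Int → Int × Int → PySem.Dict Int Int) (v : Int × Int → Int)
    (hstep : ∀ d p, step d p = d.insert p.2 (v p)) (hnd : S.Nodup)
    (i : Nat) (hi : i < S.length) :
    (((PySem.List.enumerate S 0).foldl step PySem.Dict.empty)).getD S[i] 0 = v ((i : Int), S[i]) := by
  rw [show (PySem.List.enumerate S 0).foldl step PySem.Dict.empty
      = (PySem.List.enumerate S 0).foldl (fun d p => d.insert p.2 (v p)) PySem.Dict.empty from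
    PySem.List.foldl_congr_mem _ _ _ _ (fun acc p _ => hstep acc p)]
  exact getD_foldl_insert_enum S v hnd i hi

theorem ports_eq (arr : List Int) : getMaxSubsequenceLen arr = getMaxSubsequenceLen_alt arr := by
  simp only [getMaxSubsequenceLen, getMaxSubsequenceLen_alt, counter_step,
    PySem.Dict.foldl_insert_getD_add_one_eq_counter, PySem.Dict.keys_counter]
  apply List.map_congr_left
  intro x hx
  set C := PySem.Dict.counter arr with hC
  set S := PySem.List.sorted (PySem.Set.ofList arr) (fun x => x) false with hS
  set Kd := (PySem.List.enumerate S 0).foldl (fun d p =>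
    d.insert p.2 (min p.1 (PySem.List.len S - p.1 - 1))) PySem.Dict.empty with hKd
  -- basic facts about S and C
  have hSnd : S.Nodup := (PySem.List.sorted_ofList_pairwise_lt arr).imp (fun h => ne_of_lt h)
  have hmemS : ∀ y, y ∈ S ↔ y ∈ arr := fun y =>
    (PySem.List.sorted_perm _ _ _).mem_iff.trans (PySem.Set.mem_ofList _ _)
  have hfr : ∀ y ∈ S, 1 ≤ C.getD y 0 := by
    intro y hy
    rw [hC, PySem.Dict.getD_counter]
    have := List.count_pos_iff.mpr ((hmemS y).mp hy)
    omega
  set smaller := (S.foldl (pvSumStep C Kd) (PySem.Dict.empty, [], 0)).1 with hsm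
  set greater := (S.reverse.foldl (pvSumStep C Kd) (PySem.Dict.empty, [], 0)).1 with hgt
  obtain ⟨i, hiD, hSi⟩ := List.mem_iff_getElem.mp ((hmemS x).mpr hx)
  -- the K dictionary
  have hkf : ∀ j, ∀ hj : j < S.length, Kd.getD S[j] 0 = min (j:Int) ((S.length:Int) - j - 1) := by
    intro j hj
    rw [hKd, getD_foldl_insert_enum' S _
      (fun p => min p.1 (PySem.List.len S - p.1 - 1)) (fun d p => rfl) hSnd j hj]
    simp [PySem.List.len_eq]
  have hkfrev : ∀ j, ∀ hj : j < S.reverse.length, Kd.getD S.reverse[j] 0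
      = min (j:Int) ((S.reverse.length:Int) - j - 1) := by
    intro j hj
    simp only [List.length_reverse] at hj ⊢
    rw [List.getElem_reverse, hkf (S.length - 1 - j) (by omega)]
    omega
  -- the two scanned dictionaries
  have hlow : smaller.getD x 0
      = topsum (kkOf S.length i) ((S.take i).map (fun y => C.getD y 0)) := by
    conv_lhs => rw [hsm, ← hSi]
    exact scan_getD C Kd S hSnd hfr hkf i hiD
  have hgr : greater.getD x 0
      = topsum (kkOf S.length i) ((S.drop (i+1)).map (fun y => C.getD y 0)) := by
    have hj : S.length - 1 - i < S.reverse.length := by simp; omega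
    have hrev : S.reverse[S.length - 1 - i]'hj = x := by
      rw [List.getElem_reverse]
      simp only [show S.length - 1 - (S.length - 1 - i) = i from by omega]
      exact hSi
    conv_lhs => rw [hgt, ← hrev]
    rw [scan_getD C Kd S.reverse (by simpa using hSnd)
      (by intro y hy; exact hfr y (by simpa using hy)) hkfrev (S.length - 1 - i) hj]
    have hkkeq : kkOf S.reverse.length (S.length - 1 - i) = kkOf S.length i := by
      simp only [kkOf, List.length_reverse]; omega
    rw [hkkeq]
    apply topsum_perm
    rw [List.take_reverse, show S.length - (S.length - 1 - i) = i + 1 from by omega]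
    exact ((List.reverse_perm _).map _)
  have hAns : ((PySem.Set.ofList arr).foldl (fun d x =>
      let lower := smaller.getD x 0
      let greaterv := greater.getD x 0
      let equal := C.getD x 0
      d.insert x (2 * min lower greaterv + equal + min |lower - greaterv| equal))
        PySem.Dict.empty).getD x 0
      = 2 * min (smaller.getD x 0) (greater.getD x 0) + C.getD x 0
        + min |smaller.getD x 0 - greater.getD x 0| (C.getD x 0) :=
    getD_foldl_insert_fn' _ _ _ (fun d k => rfl) (PySem.Set.nodup_ofList _)
      ((PySem.Set.mem_ofList _ _).mpr hx)
  rw [hAns, hlow, hgr]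
  conv_rhs => rw [← hSi]
  rw [getD_foldl_insert_enum' S _ _ (fun d p => rfl) hSnd i hiD]
  dsimp only
  rw [show (min ((i:Nat):Int) (PySem.List.len S - 1 - ((i:Nat):Int))) = ((kkOf S.length i : Nat):Int)
    from by simp [PySem.List.len_eq, kkOf]; omega]
  simp only [PySem.List.slice_to_natCast]
  rw [show ((i:Nat):Int) + 1 = (((i+1):Nat):Int) from by push_cast; ring]
  simp only [PySem.List.slice_from_natCast, PySem.List.pyGetD_natCast]
  rw [List.getD_eq_getElem _ _ (by simpa using hiD), List.getElem_map, hSi,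
    ← List.map_take, ← List.map_drop]
  simp only [topsum]

-- ===== VERDICT (by name: the statement is the Claim_ definition above) =====
theorem getMaxSubsequenceLen_spec : Claim_equal_getMaxSubsequenceLen :=
  fun arr _ => ports_eq arr
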